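-- pv_equiv track=rewrite | github.com/Tianwen-AI/seg_routing | predict.py | matrix_to_path
-- ===== SOURCE A (Python) =====
-- def matrix_to_path(matrix):
--     # 存储路径线段
--     path_segments = []
--
--     # 按行遍历以找到水平路径
--     for y in range(len(matrix)):
--         x_start = None
--         for x in range(len(matrix[y])):
--             if matrix[y][x] == 1:
--                 if x_start is None:
--                     x_start = x  # 记录起点
--                 if x == len(matrix[y]) - 1 or matrix[y][x + 1] == 0:  # 到达终点
--                     if x_start != x:  # 如果起点和终点不同，说明有连续的水平路径
--                         # 添加水平线段
--                         path_segments.append((x_start, y))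
--                         path_segments.append((x, y))
--                     x_start = None  # 重置起点
--             else:
--                 x_start = None  # 遇到0，重置起点
--     # 按列遍历以找到垂直路径
--     for x in range(len(matrix[0])):
--         y_start = None
--         for y in range(len(matrix)):
--             if matrix[y][x] == 1:
--                 if y_start is None:
--                     y_start = y  # 记录起点
--                 if y == len(matrix) - 1 or matrix[y + 1][x] == 0:  # 到达终点
--                     if y_start != y:  # 如果起点和终点不同，说明有连续垂直路径
--                         # 添加垂直线段
--                         path_segments.append((x, y_start))
--                         path_segments.append((x, y))
--
--                     y_start = None  # 重置起点
--             else: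
--                 y_start = None  # 遇到0，重置起点
--
--     return path_segments
-- ===== SOURCE B (Python) =====
-- def _runs(vals):
--     # maximal runs of equal values: (value, first_index, last_index)
--     runs = []
--     i = 0
--     n = len(vals)
--     while i < n:
--         j = i + 1
--         while j < n and vals[j] == vals[i]:
--             j += 1
--         runs.append((vals[i], i, j - 1))
--         i = j
--     return runs
--
--
-- def _ends(rs):
--     # endpoints (i, j) of runs of 1s of length >= 2 that are terminated
--     # by the end of the line or by a 0
--     out = []
--     for k in range(len(rs)):
--         v, i, j = rs[k]
--         if v == 1 and i < j and (k == len(rs) - 1 or rs[k + 1][0] == 0):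
--             out.append((i, j))
--     return out
--
--
-- def matrix_to_path(matrix):
--     segs = []
--     for y, row in enumerate(matrix):
--         for i, j in _ends(_runs(row)):
--             segs.append((i, y))
--             segs.append((j, y))
--     height = len(matrix)
--     for x in range(len(matrix[0])):
--         col = [matrix[y][x] for y in range(height)]
--         for i, j in _ends(_runs(col)):
--             segs.append((x, i))
--             segs.append((x, j))
--     return segs
-- ===== Notes on version B (the rewrite author's own statement) =====
-- stated objective: alternative
-- what changed: Replaces the stateful index-scan with Option start marker by a two-phase run decomposition: rows/columns are first split into maximal runs of equal values, then qualifying 1-runs (length >= 2, terminated by a 0 or the line end, read off the NEXT run's value) emit their two endpoints; columns are materialised as explicit lists instead of being probed through matrix[y][x]/matrix[y+1][x] lookaheads.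
import Mathlib
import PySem

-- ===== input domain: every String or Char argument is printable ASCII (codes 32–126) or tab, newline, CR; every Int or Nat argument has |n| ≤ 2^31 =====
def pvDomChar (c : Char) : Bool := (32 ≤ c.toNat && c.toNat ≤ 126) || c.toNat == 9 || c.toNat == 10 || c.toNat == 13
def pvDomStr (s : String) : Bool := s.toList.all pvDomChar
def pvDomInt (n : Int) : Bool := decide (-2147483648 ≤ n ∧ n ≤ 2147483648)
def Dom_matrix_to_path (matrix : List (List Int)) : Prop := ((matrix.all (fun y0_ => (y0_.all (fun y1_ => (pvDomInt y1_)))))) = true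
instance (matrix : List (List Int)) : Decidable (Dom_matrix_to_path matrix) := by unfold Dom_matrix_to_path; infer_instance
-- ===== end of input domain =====

-- B replaces A's stateful Option-marker index scan by a run decomposition (maximal equal-value
-- runs, then endpoint emission from qualifying 1-runs, columns materialised as lists); same cost.


-- ===== PORT A =====
-- per-row loop body of A's horizontal pass (state = (x_start, path_segments))
def mtpRowStep (row : List Int) (y : Int) (st : Option Int × List (Int × Int)) (x : Int) :
    Option Int × List (Int × Int) :=
  if PySem.List.pyGetD row x 0 = 1 then
    let xs := if st.1 = none then some x else st.1
    if x = (row.length : Int) - 1 ∨ PySem.List.pyGetD row (x + 1) 0 = 0 then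
      if xs ≠ some x then (none, st.2 ++ [(xs.getD 0, y), (x, y)]) else (none, st.2)
    else (xs, st.2)
  else (none, st.2)

-- per-column loop body of A's vertical pass (reads matrix[y][x] and matrix[y+1][x] directly)
def mtpColStep (matrix : List (List Int)) (x : Int) (st : Option Int × List (Int × Int)) (y : Int) :
    Option Int × List (Int × Int) :=
  if PySem.List.pyGetD (PySem.List.pyGetD matrix y []) x 0 = 1 then
    let ys := if st.1 = none then some y else st.1
    if y = (matrix.length : Int) - 1 ∨ PySem.List.pyGetD (PySem.List.pyGetD matrix (y + 1) []) x 0 = 0 then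
      if ys ≠ some y then (none, st.2 ++ [(x, ys.getD 0), (x, y)]) else (none, st.2)
    else (ys, st.2)
  else (none, st.2)

def matrix_to_path (matrix : List (List Int)) : List (Int × Int) :=
  let hor := (PySem.List.pyRange 0 (matrix.length : Int) 1).foldl
    (fun segs y =>
      ((PySem.List.pyRange 0 ((PySem.List.pyGetD matrix y []).length : Int) 1).foldl
        (mtpRowStep (PySem.List.pyGetD matrix y []) y) (none, segs)).2)
    []
  (PySem.List.pyRange 0 ((PySem.List.pyGetD matrix 0 []).length : Int) 1).foldl
    (fun segs x =>
      ((PySem.List.pyRange 0 (matrix.length : Int) 1).foldl (mtpColStep matrix x) (none, segs)).2)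
    hor

-- ===== PORT B =====
-- length of the leading block of elements equal to v (B's inner while loop)
def mtpCountLead (v : Int) : List Int → Nat
  | [] => 0
  | w :: t => if w = v then mtpCountLead v t + 1 else 0

-- B's _runs: maximal runs of equal values as (value, first_index, last_index)
def mtpRuns : List Int → Int → List (Int × Int × Int)
  | [], _ => []
  | v :: t, i =>
      let k := mtpCountLead v t
      (v, i, i + (k : Int)) :: mtpRuns (t.drop k) (i + (k : Int) + 1)
  termination_by l _ => l.length
  decreasing_by simp

-- B's _ends: endpoints of 1-runs of length ≥ 2 terminated by the line end or a 0
-- (the k == len-1 / rs[k+1][0] lookahead becomes a lookahead at the head of the tail)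
def mtpEnds : List (Int × Int × Int) → List (Int × Int)
  | [] => []
  | (v, i, j) :: rest =>
      (if v = 1 ∧ i < j ∧ (rest.headD (0, 0, 0)).1 = 0 then [(i, j)] else []) ++ mtpEnds rest

-- B's col = [matrix[y][x] for y in range(height)]
def mtpCol (matrix : List (List Int)) (x : Int) : List Int :=
  (PySem.List.pyRange 0 (matrix.length : Int) 1).map
    (fun y => PySem.List.pyGetD (PySem.List.pyGetD matrix y []) x 0)

def matrix_to_path_alt (matrix : List (List Int)) : List (Int × Int) :=
  let hor := (PySem.List.enumerate matrix 0).foldl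
    (fun segs p =>
      (mtpEnds (mtpRuns p.2 0)).foldl (fun segs q => segs ++ [(q.1, p.1), (q.2, p.1)]) segs)
    []
  (PySem.List.pyRange 0 ((PySem.List.pyGetD matrix 0 []).length : Int) 1).foldl
    (fun segs x =>
      (mtpEnds (mtpRuns (mtpCol matrix x) 0)).foldl (fun segs q => segs ++ [(x, q.1), (x, q.2)]) segs)
    hor

-- ===== PRECONDITION & SPEC =====
-- Pre_ excludes exactly the inputs on which Python A raises: the empty matrix (IndexError at
-- matrix[0]) and matrices with a row shorter than row 0 (IndexError at matrix[y][x] in the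
-- vertical pass).
def Pre_matrix_to_path (matrix : List (List Int)) : Prop :=
  matrix ≠ [] ∧ ∀ r ∈ matrix, (matrix.headD []).length ≤ r.length
instance (matrix : List (List Int)) : Decidable (Pre_matrix_to_path matrix) := by
  unfold Pre_matrix_to_path; infer_instance
def pvWitness_matrix_to_path : List (List Int) := [[1, 1, 0], [1, 0, 1], [1, 1, 1]]

def Spec_matrix_to_path (matrix : List (List Int)) (out : List (Int × Int)) : Prop :=
  out = matrix_to_path_alt matrix
instance (matrix : List (List Int)) (out : List (Int × Int)) : Decidable (Spec_matrix_to_path matrix out) := by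
  unfold Spec_matrix_to_path; infer_instance

-- ===== CLAIM (what is proved, stated in full; the proofs are below) =====
def Claim_equal_matrix_to_path : Prop := ∀ (matrix : List (List Int)), Dom_matrix_to_path matrix → Pre_matrix_to_path matrix → Spec_matrix_to_path matrix (matrix_to_path matrix)

-- ===== LEMMAS AND PROOFS =====

-- generic form of A's per-line scan step: mtpRowStep/mtpColStep with the emission abstracted
def mtpStepA (l : List Int) (emit : Int → Int → List (Int × Int))
    (st : Option Int × List (Int × Int)) (x : Int) : Option Int × List (Int × Int) :=
  if PySem.List.pyGetD l x 0 = 1 then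
    if x = (l.length : Int) - 1 ∨ PySem.List.pyGetD l (x + 1) 0 = 0 then
      if (if st.1 = none then some x else st.1) ≠ some x then
        (none, st.2 ++ emit ((if st.1 = none then some x else st.1).getD 0) x)
      else (none, st.2)
    else ((if st.1 = none then some x else st.1), st.2)
  else (none, st.2)

-- structural form of A's per-line scan (consumes the line, lookahead = head of the tail)
def mtpScan (emit : Int → Int → List (Int × Int)) :
    List Int → Int → Option Int → List (Int × Int) → List (Int × Int)
  | [], _, _, acc => acc
  | v :: t, x, xs, acc =>
      if v = 1 then
        if t.headD 0 = 0 then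
          if (if xs = none then some x else xs) ≠ some x then
            mtpScan emit t (x + 1) none (acc ++ emit ((if xs = none then some x else xs).getD 0) x)
          else mtpScan emit t (x + 1) none acc
        else mtpScan emit t (x + 1) (if xs = none then some x else xs) acc
      else mtpScan emit t (x + 1) none acc

-- indexed lookup with default 0 is the head of the dropped suffix
lemma mtp_get_headD (l : List Int) (a : Int) (h : 0 ≤ a) :
    PySem.List.pyGetD l a 0 = (l.drop a.toNat).headD 0 := by
  rw [PySem.List.pyGetD_of_nonneg l 0 h]
  simp [List.getD_eq_getElem?_getD, List.headD_eq_head?_getD, List.head?_drop]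

-- a line whose first value is not 1 is scanned the same from any carried start marker
lemma mtp_scan_none (emit : Int → Int → List (Int × Int)) (t : List Int) (p s : Int)
    (acc : List (Int × Int)) (h : t.headD 0 ≠ 1) :
    mtpScan emit t p (some s) acc = mtpScan emit t p none acc := by
  cases t with
  | nil => rfl
  | cons w t' => simp only [List.headD_cons] at h; simp [mtpScan, h]

-- scanning a run of 1s: the marker survives to the run's last cell, where at most one emission happens
lemma mtp_scan_run (emit : Int → Int → List (Int × Int)) (t : List Int) :
    ∀ (x s : Int) (acc : List (Int × Int)),
    mtpScan emit (1 :: t) x (some s) acc =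
      mtpScan emit (t.drop (mtpCountLead 1 t)) (x + (mtpCountLead 1 t : Int) + 1) none
        (if (t.drop (mtpCountLead 1 t)).headD 0 = 0 ∧ s ≠ x + (mtpCountLead 1 t : Int)
         then acc ++ emit s (x + (mtpCountLead 1 t : Int)) else acc) := by
  induction t with
  | nil =>
      intro x s acc
      by_cases h : s = x <;> simp [mtpScan, mtpCountLead, h]
  | cons w t' ih =>
      intro x s acc
      by_cases hw : w = 1
      · subst hw
        have hk : mtpCountLead 1 (1 :: t') = mtpCountLead 1 t' + 1 := by simp [mtpCountLead]
        rw [hk]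
        have hL : mtpScan emit (1 :: 1 :: t') x (some s) acc
            = mtpScan emit (1 :: t') (x + 1) (some s) acc := by
          simp [mtpScan]
        rw [hL, ih (x + 1) s acc]
        have h1 : ((mtpCountLead 1 t' + 1 : Nat) : Int) = (mtpCountLead 1 t' : Int) + 1 := by
          push_cast; ring
        rw [h1]
        have h2 : x + ((mtpCountLead 1 t' : Int) + 1) = x + 1 + (mtpCountLead 1 t' : Int) := by ring
        simp only [List.drop_succ_cons, h2]
      · have hk : mtpCountLead 1 (w :: t') = 0 := by simp [mtpCountLead, hw]
        rw [hk]
        by_cases hw0 : w = 0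
        · subst hw0
          by_cases hs : s = x <;>
            simp [mtpScan, hs]
        · have hL : mtpScan emit (1 :: w :: t') x (some s) acc
              = mtpScan emit (w :: t') (x + 1) (some s) acc := by
            simp [mtpScan, hw0]
          rw [hL, mtp_scan_none emit (w :: t') (x + 1) s acc (by simpa using hw)]
          simp [hw0]

-- scanning a run of a non-1 value: nothing is emitted and the marker stays clear
lemma mtp_scan_skip (emit : Int → Int → List (Int × Int)) (v : Int) (hv : v ≠ 1) (t : List Int) :
    ∀ (x : Int) (acc : List (Int × Int)),
    mtpScan emit (v :: t) x none acc =
      mtpScan emit (t.drop (mtpCountLead v t)) (x + (mtpCountLead v t : Int) + 1) none acc := by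
  induction t with
  | nil => intro x acc; simp [mtpScan, mtpCountLead, hv]
  | cons w t' ih =>
      intro x acc
      have hL : mtpScan emit (v :: w :: t') x none acc
          = mtpScan emit (w :: t') (x + 1) none acc := by
        simp [mtpScan, hv]
      by_cases hw : w = v
      · subst hw
        have hk : mtpCountLead w (w :: t') = mtpCountLead w t' + 1 := by simp [mtpCountLead]
        rw [hk, hL, ih (x + 1) acc]
        have h1 : ((mtpCountLead w t' + 1 : Nat) : Int) = (mtpCountLead w t' : Int) + 1 := by
          push_cast; ring
        rw [h1]
        have h2 : x + ((mtpCountLead w t' : Int) + 1) = x + 1 + (mtpCountLead w t' : Int) := by ring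
        simp only [List.drop_succ_cons, h2]
      · have hk : mtpCountLead v (w :: t') = 0 := by simp [mtpCountLead, hw]
        rw [hk, hL]
        simp

-- the first run of mtpRuns carries the first value of the line
lemma mtp_runs_head_val (s : List Int) (p : Int) :
    ((mtpRuns s p).headD (0, 0, 0)).1 = s.headD 0 := by
  cases s <;> simp [mtpRuns]

-- core: A's structural scan equals B's run decomposition followed by endpoint emission
lemma mtp_scan_eq_runs (emit : Int → Int → List (Int × Int)) :
    ∀ (n : Nat) (l : List Int), l.length ≤ n → ∀ (x : Int) (acc : List (Int × Int)),
    mtpScan emit l x none acc =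
      (mtpEnds (mtpRuns l x)).foldl (fun a q => a ++ emit q.1 q.2) acc := by
  intro n
  induction n with
  | zero =>
      intro l hl x acc
      have : l = [] := List.length_eq_zero_iff.mp (Nat.le_zero.mp hl)
      subst this; simp [mtpScan, mtpRuns, mtpEnds]
  | succ n ih =>
      intro l hl x acc
      cases l with
      | nil => simp [mtpScan, mtpRuns, mtpEnds]
      | cons v t =>
          have hrec : (t.drop (mtpCountLead v t)).length ≤ n := by
            simp only [List.length_drop]
            simp at hl
            omega
          by_cases hv : v = 1
          · subst hv
            have h4 : mtpScan emit (1 :: t) x none acc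
                = mtpScan emit (1 :: t) x (some x) acc := by simp [mtpScan]
            rw [h4, mtp_scan_run emit t x x acc,
              ih _ hrec (x + (mtpCountLead 1 t : Int) + 1) _]
            rw [mtpRuns]
            show _ = (mtpEnds ((1, x, x + (mtpCountLead 1 t : Int)) ::
              mtpRuns (t.drop (mtpCountLead 1 t)) (x + (mtpCountLead 1 t : Int) + 1))).foldl _ acc
            rw [mtpEnds, List.foldl_append]
            congr 1
            rw [mtp_runs_head_val]
            by_cases hz : (t.drop (mtpCountLead 1 t)).headD 0 = 0 <;>
              by_cases hk0 : mtpCountLead 1 t = 0 <;>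
              have hz' := hz <;> simp only [List.headD_eq_head?_getD, List.head?_drop] at hz'
            · simp [hk0]
            · have hne : x ≠ x + (mtpCountLead 1 t : Int) := by omega
              have hlt : x < x + (mtpCountLead 1 t : Int) := by omega
              simp [hz', hne, hlt]
            · simp [hk0]
            · simp [hz']
          · rw [show mtpScan emit (v :: t) x none acc = mtpScan emit t (x + 1) none acc by
                simp [mtpScan, hv]]
            have h5 := mtp_scan_skip emit v hv t
            rw [show mtpScan emit t (x + 1) none acc
                = mtpScan emit (t.drop (mtpCountLead v t)) (x + (mtpCountLead v t : Int) + 1) none acc by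
                  have := h5 x acc; rw [← this]; simp [mtpScan, hv],
              ih _ hrec (x + (mtpCountLead v t : Int) + 1) acc]
            rw [mtpRuns]
            show _ = (mtpEnds ((v, x, x + (mtpCountLead v t : Int)) ::
              mtpRuns (t.drop (mtpCountLead v t)) (x + (mtpCountLead v t : Int) + 1))).foldl _ acc
            rw [mtpEnds]
            simp [hv]

-- A's indexed fold over the line equals the structural scan
lemma mtp_fold_eq_scan (l : List Int) (emit : Int → Int → List (Int × Int)) :
    ∀ (t : List Int) (a : Int), 0 ≤ a → t = l.drop a.toNat →
    ∀ (xs : Option Int) (acc : List (Int × Int)),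
    ((PySem.List.pyRange a (l.length : Int) 1).foldl (mtpStepA l emit) (xs, acc)).2 =
      mtpScan emit t a xs acc := by
  intro t
  induction t with
  | nil =>
      intro a ha ht xs acc
      have hlen : l.length ≤ a.toNat := by
        by_contra h
        have := List.drop_eq_nil_iff.mp ht.symm
        omega
      rw [PySem.List.pyRange_one_eq_nil (by omega)]
      simp [mtpScan]
  | cons v t' ih =>
      intro a ha ht xs acc
      have hlt : a.toNat < l.length := by
        by_contra h
        rw [List.drop_eq_nil_iff.mpr (by omega)] at ht
        exact absurd ht (by simp)
      have ht' : t' = l.drop (a + 1).toNat := by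
        have h1 : (a + 1).toNat = a.toNat + 1 := by omega
        rw [h1, ← List.drop_drop, ← ht]
        simp
      have hv : PySem.List.pyGetD l a 0 = v := by
        rw [mtp_get_headD l a ha, ← ht]; simp
      have hla : PySem.List.pyGetD l (a + 1) 0 = t'.headD 0 := by
        rw [mtp_get_headD l (a + 1) (by omega), ← ht']
      have hC : (a = (l.length : Int) - 1 ∨ PySem.List.pyGetD l (a + 1) 0 = 0)
          ↔ t'.headD 0 = 0 := by
        rw [hla]
        constructor
        · rintro (h | h)
          · have h2 : (a + 1).toNat = l.length := by omega
            rw [ht', h2, List.drop_length]; rfl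
          · exact h
        · exact fun h => Or.inr h
      rw [PySem.List.pyRange_one_cons (by exact_mod_cast (by omega : a < (l.length : Int))),
        List.foldl_cons]
      have key : ∀ st : Option Int × List (Int × Int),
          ((PySem.List.pyRange (a + 1) (l.length : Int) 1).foldl (mtpStepA l emit) st).2 =
            mtpScan emit t' (a + 1) st.1 st.2 := fun st =>
        ih (a + 1) (by omega) ht' st.1 st.2
      rw [key]
      by_cases h1 : v = 1
      · subst h1
        by_cases h2 : t'.headD 0 = 0
        · by_cases h3 : (if xs = none then some a else xs) ≠ some a
          · rw [show mtpStepA l emit (xs, acc) a =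
                (none, acc ++ emit ((if xs = none then some a else xs).getD 0) a) by
                  simp only [mtpStepA, hv, if_true]
                  rw [if_pos (hC.mpr h2), if_pos h3]]
            rw [show mtpScan emit (1 :: t') a xs acc =
                mtpScan emit t' (a + 1) none
                  (acc ++ emit ((if xs = none then some a else xs).getD 0) a) by
                  simp only [mtpScan, if_true]
                  rw [if_pos h2, if_pos h3]]
          · rw [show mtpStepA l emit (xs, acc) a = (none, acc) by
                  simp only [mtpStepA, hv, if_true]
                  rw [if_pos (hC.mpr h2), if_neg h3]]
            rw [show mtpScan emit (1 :: t') a xs acc = mtpScan emit t' (a + 1) none acc by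
                  simp only [mtpScan, if_true]
                  rw [if_pos h2, if_neg h3]]
        · rw [show mtpStepA l emit (xs, acc) a =
              ((if xs = none then some a else xs), acc) by
                simp only [mtpStepA, hv, if_true]
                rw [if_neg (fun hc => h2 (hC.mp hc))]]
          rw [show mtpScan emit (1 :: t') a xs acc =
              mtpScan emit t' (a + 1) (if xs = none then some a else xs) acc by
                simp only [mtpScan, if_true]
                rw [if_neg h2]]
      · rw [show mtpStepA l emit (xs, acc) a = (none, acc) by
              simp only [mtpStepA, hv]
              rw [if_neg h1]]
        rw [show mtpScan emit (v :: t') a xs acc = mtpScan emit t' (a + 1) none acc by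
              simp only [mtpScan]
              rw [if_neg h1]]

-- one line, assembled: A's indexed scan of a line = B's run/endpoint form
lemma mtp_line (l : List Int) (emit : Int → Int → List (Int × Int)) (acc : List (Int × Int)) :
    ((PySem.List.pyRange 0 (l.length : Int) 1).foldl (mtpStepA l emit) (none, acc)).2 =
      (mtpEnds (mtpRuns l 0)).foldl (fun a q => a ++ emit q.1 q.2) acc := by
  rw [mtp_fold_eq_scan l emit l 0 le_rfl (by simp) none acc]
  exact mtp_scan_eq_runs emit l.length l le_rfl 0 acc

-- the column list has the height of the matrix
lemma mtp_col_length (matrix : List (List Int)) (x : Int) :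
    ((mtpCol matrix x).length : Int) = (matrix.length : Int) := by
  simp [mtpCol, PySem.List.length_pyRange_one]

-- on in-range rows, A's direct matrix[y][x] probing step is the generic step on the column list
lemma mtp_colStep_eq (matrix : List (List Int)) (x : Int)
    (st : Option Int × List (Int × Int)) (y : Int)
    (hy : y ∈ PySem.List.pyRange 0 (matrix.length : Int) 1) :
    mtpColStep matrix x st y = mtpStepA (mtpCol matrix x) (fun i j => [(x, i), (x, j)]) st y := by
  rw [PySem.List.mem_pyRange_one] at hy
  obtain ⟨h0, h1⟩ := hy
  have hg : PySem.List.pyGetD (mtpCol matrix x) y 0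
      = PySem.List.pyGetD (PySem.List.pyGetD matrix y []) x 0 :=
    PySem.List.pyGetD_map_pyRange_of_nonneg _ _ _ _ h0 h1
  have hg1 : PySem.List.pyGetD (mtpCol matrix x) (y + 1) 0
      = PySem.List.pyGetD (PySem.List.pyGetD matrix (y + 1) []) x 0 := by
    by_cases h : y + 1 < (matrix.length : Int)
    · exact PySem.List.pyGetD_map_pyRange_of_nonneg _ _ _ _ (by omega) h
    · have hy1 : y + 1 = (matrix.length : Int) := by omega
      have hout : PySem.List.pyGetD matrix (y + 1) [] = [] := by
        rw [PySem.List.pyGetD_of_nonneg matrix [] (by omega), hy1]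
        have : ((matrix.length : Int)).toNat = matrix.length := by omega
        rw [this]
        simp [List.getD_eq_getElem?_getD]
      rw [hout]
      rw [PySem.List.pyGetD_of_nonneg (mtpCol matrix x) 0 (by omega), hy1]
      have hcl : (mtpCol matrix x).length = matrix.length := by
        have := mtp_col_length matrix x
        omega
      have h2 : ((matrix.length : Int)).toNat = (mtpCol matrix x).length := by omega
      rw [h2]
      rw [List.getD_eq_getElem?_getD, List.getElem?_eq_none (le_refl _)]
      simp [PySem.List.pyGetD, PySem.List.pyGet?, PySem.List.pyIdx?]
  unfold mtpColStep mtpStepA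
  rw [hg, hg1, mtp_col_length matrix x]

-- the two programs return the same segment list on every input
lemma mtp_main (matrix : List (List Int)) :
    matrix_to_path matrix = matrix_to_path_alt matrix := by
  have hrow : ∀ (segs : List (Int × Int)) (y : Int),
      ((PySem.List.pyRange 0 ((PySem.List.pyGetD matrix y []).length : Int) 1).foldl
        (mtpRowStep (PySem.List.pyGetD matrix y []) y) (none, segs)).2
      = (mtpEnds (mtpRuns (PySem.List.pyGetD matrix y []) 0)).foldl
          (fun s q => s ++ [(q.1, y), (q.2, y)]) segs := by
    intro segs y
    have hstep : mtpRowStep (PySem.List.pyGetD matrix y []) y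
        = mtpStepA (PySem.List.pyGetD matrix y []) (fun i j => [(i, y), (j, y)]) := rfl
    rw [hstep]
    exact mtp_line _ _ segs
  have hhor :
      (PySem.List.pyRange 0 (matrix.length : Int) 1).foldl
        (fun segs y =>
          ((PySem.List.pyRange 0 ((PySem.List.pyGetD matrix y []).length : Int) 1).foldl
            (mtpRowStep (PySem.List.pyGetD matrix y []) y) (none, segs)).2) []
      = (PySem.List.enumerate matrix).foldl
          (fun segs p => (mtpEnds (mtpRuns p.2 0)).foldl
            (fun segs q => segs ++ [(q.1, p.1), (q.2, p.1)]) segs) [] := by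
    rw [PySem.List.enumerate_eq_map_pyRange matrix ([] : List Int), List.foldl_map]
    simp only [PySem.List.len_eq]
    exact PySem.List.foldl_congr_mem _ _ _ _ (fun acc y _ => hrow acc y)
  have hvert : ∀ init : List (Int × Int),
      (PySem.List.pyRange 0 ((PySem.List.pyGetD matrix 0 []).length : Int) 1).foldl
        (fun segs x =>
          ((PySem.List.pyRange 0 (matrix.length : Int) 1).foldl (mtpColStep matrix x)
            (none, segs)).2) init
      = (PySem.List.pyRange 0 ((PySem.List.pyGetD matrix 0 []).length : Int) 1).foldl
          (fun segs x => (mtpEnds (mtpRuns (mtpCol matrix x) 0)).foldl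
            (fun segs q => segs ++ [(x, q.1), (x, q.2)]) segs) init := by
    intro init
    apply PySem.List.foldl_congr_mem
    intro acc x _
    rw [PySem.List.foldl_congr_mem _ (mtpColStep matrix x)
      (mtpStepA (mtpCol matrix x) (fun i j => [(x, i), (x, j)])) _
      (fun st y hy => mtp_colStep_eq matrix x st y hy)]
    rw [show (matrix.length : Int) = ((mtpCol matrix x).length : Int) from
      (mtp_col_length matrix x).symm]
    exact mtp_line (mtpCol matrix x) _ acc
  show (PySem.List.pyRange 0 ((PySem.List.pyGetD matrix 0 []).length : Int) 1).foldl _ _ = _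
  rw [hhor, hvert]
  rfl

-- ===== VERDICT (by name: the statement is the Claim_ definition above) =====
theorem matrix_to_path_spec : Claim_equal_matrix_to_path := by
  intro matrix _ _
  show matrix_to_path matrix = matrix_to_path_alt matrix
  exact mtp_main matrix
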